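-- pv_equiv track=rewrite | github.com/FireChickenProductivity/TalonVoiceDictationSetup | correction_rules.py | _find_position_word_left
-- ===== SOURCE A (Python) =====
-- def _find_position_word_left(text: str, current_index: int):
--     non_space_character_encountered: bool = False
--     first_character_is_space: bool = False
--     first_character: str = text[current_index - 1]
--     if first_character.isspace():
--         first_character_is_space = True
--     else:
--         non_space_character_encountered = True
--
--     for index in range(current_index - 1, 0, -1):
--         character: str = text[index - 1]
--         if character.isspace():
--             if first_character_is_space:
--                 if non_space_character_encountered:
--                     return index
--             else:
--                 return index
--         else:
--             non_space_character_encountered = True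
--     return 0
-- ===== SOURCE B (Python) =====
-- def _find_position_word_left(text: str, current_index: int):
--     first = text[current_index - 1]
--     p = current_index - 1
--     if p <= 0:
--         return 0
--     s = text[:p]
--     if first.isspace():
--         s = s.rstrip()
--     # single FORWARD pass: the answer is one past the last whitespace in s (0 if none)
--     last_space = -1
--     for i, c in enumerate(s):
--         if c.isspace():
--             last_space = i
--     return last_space + 1
-- ===== Notes on version B (the rewrite author's own statement) =====
-- stated objective: alternative
-- what changed: Replaced A's single backward flag-driven state-machine scan by slicing the prefix text[:p], rstrip-ing it when the cursor character is whitespace, and one FORWARD pass over enumerate(s) that remembers the last whitespace position, returning last_space + 1.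
import Mathlib
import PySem

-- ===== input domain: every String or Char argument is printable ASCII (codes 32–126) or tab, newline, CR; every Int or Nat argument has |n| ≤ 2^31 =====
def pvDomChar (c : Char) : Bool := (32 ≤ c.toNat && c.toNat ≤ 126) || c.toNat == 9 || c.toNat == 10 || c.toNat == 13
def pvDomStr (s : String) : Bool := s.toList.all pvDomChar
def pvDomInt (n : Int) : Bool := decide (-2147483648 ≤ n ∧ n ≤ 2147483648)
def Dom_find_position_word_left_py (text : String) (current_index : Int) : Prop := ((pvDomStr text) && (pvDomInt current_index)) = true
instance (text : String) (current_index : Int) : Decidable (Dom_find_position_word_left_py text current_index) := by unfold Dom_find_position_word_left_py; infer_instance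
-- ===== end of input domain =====

-- B replaces A's backward flag-driven state-machine scan by rstrip on the prefix plus one
-- FORWARD pass remembering the last whitespace position: simpler, same cost.

-- ===== PORT A =====
-- the for-loop over range(current_index-1, 0, -1) with state non_space_character_encountered;
-- returning `idx` = Python's early `return index`, reaching [] = Python's final `return 0`
def find_position_word_left_py_loop (cs : List Char) (firstSpace : Bool) :
    List Int → Bool → Int
  | [], _ => 0
  | idx :: rest, nonSpace =>
    let c := PySem.List.pyGetD cs (idx - 1) ' '
    if PySem.Chars.isspace c then
      if firstSpace then
        if nonSpace then idx else find_position_word_left_py_loop cs firstSpace rest nonSpace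
      else idx
    else find_position_word_left_py_loop cs firstSpace rest true

def find_position_word_left_py (text : String) (current_index : Int) : Int :=
  match PySem.List.pyGet? text.toList (current_index - 1) with
  | none => 0   -- IndexError in Python; excluded by Pre_
  | some first_character =>
    let firstSpace := PySem.Chars.isspace first_character
    find_position_word_left_py_loop text.toList firstSpace
      (PySem.List.pyRange (current_index - 1) 0 (-1)) (!firstSpace)

-- ===== PORT B =====
-- first = text[current_index-1]; p = current_index-1; if p <= 0: return 0;
-- s = text[:p]; if first.isspace(): s = s.rstrip();
-- then one forward pass over enumerate(s) keeping last_space; return last_space + 1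
def find_position_word_left_py_alt (text : String) (current_index : Int) : Int :=
  match PySem.List.pyGet? text.toList (current_index - 1) with
  | none => 0   -- IndexError in Python; excluded by Pre_
  | some first =>
    let p := current_index - 1
    if p ≤ 0 then 0
    else
      let s := PySem.List.slice text.toList none (some p)
      let s' := if PySem.Chars.isspace first then PySem.Chars.rstrip s else s
      (PySem.List.enumerate s').foldl
        (fun last_space ic => if PySem.Chars.isspace ic.2 then ic.1 else last_space) (-1) + 1

-- ===== PRECONDITION & SPEC =====
-- exactly the inputs on which Python A returns: text[current_index-1] must be in range
def Pre_find_position_word_left_py (text : String) (current_index : Int) : Prop :=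
  -(text.toList.length : Int) ≤ current_index - 1 ∧ current_index - 1 < (text.toList.length : Int)
instance (text : String) (current_index : Int) : Decidable (Pre_find_position_word_left_py text current_index) := by unfold Pre_find_position_word_left_py; infer_instance

def pvWitness_find_position_word_left_py : String × Int := ("ab cd", 5)

def Spec_find_position_word_left_py (text : String) (current_index : Int) (out : Int) : Prop := out = find_position_word_left_py_alt text current_index
instance (text : String) (current_index : Int) (out : Int) : Decidable (Spec_find_position_word_left_py text current_index out) := by unfold Spec_find_position_word_left_py; infer_instance

-- ===== CLAIM (what is proved, stated in full; the proofs are below) =====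
def Claim_equal_find_position_word_left_py : Prop := ∀ (text : String) (current_index : Int), Dom_find_position_word_left_py text current_index → Pre_find_position_word_left_py text current_index → Spec_find_position_word_left_py text current_index (find_position_word_left_py text current_index)

-- ===== LEMMAS AND PROOFS =====

-- proof-side abbreviations of A's two scanning phases, used to characterise A's loop
def pvSkipSpaces (cs : List Char) (p : Int) : Int :=
  if h : 0 < p ∧ PySem.Chars.isspace (PySem.List.pyGetD cs (p - 1) ' ') = true then
    pvSkipSpaces cs (p - 1)
  else p
termination_by p.toNat
decreasing_by have := h.1; omega

def pvSkipWord (cs : List Char) (p : Int) : Int :=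
  if h : 0 < p ∧ ¬ PySem.Chars.isspace (PySem.List.pyGetD cs (p - 1) ' ') = true then
    pvSkipWord cs (p - 1)
  else p
termination_by p.toNat
decreasing_by have := h.1; omega

-- B's forward fold
def pvLastFold (xs : List Char) : Int :=
  (PySem.List.enumerate xs).foldl
    (fun last_space ic => if PySem.Chars.isspace ic.2 then ic.1 else last_space) (-1)

theorem pvLastFold_concat (xs : List Char) (c : Char) :
    pvLastFold (xs ++ [c])
      = if PySem.Chars.isspace c then (xs.length : Int) else pvLastFold xs := by
  unfold pvLastFold
  rw [PySem.List.enumerate_append, List.foldl_append]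
  simp [PySem.List.enumerate_cons, PySem.List.enumerate_nil]

theorem pv_rstrip_concat (xs : List Char) (c : Char) :
    PySem.Chars.rstrip (xs ++ [c])
      = if PySem.Chars.isspace c then PySem.Chars.rstrip xs else xs ++ [c] := by
  simp only [PySem.Chars.rstrip, List.reverse_append, List.reverse_cons, List.reverse_nil,
    List.nil_append, List.cons_append, List.dropWhile_cons]
  split_ifs with h <;> simp

-- once non_space_character_encountered is true, A's loop returns at the next space,
-- regardless of firstSpace: it is exactly the word-skipping phase
theorem pv_loop_word (cs : List Char) (fs : Bool) (n : Nat) :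
    find_position_word_left_py_loop cs fs (PySem.List.pyRange (n : Int) 0 (-1)) true
      = pvSkipWord cs (n : Int) := by
  induction n with
  | zero =>
    rw [PySem.List.pyRange_neg_one_eq_nil (by omega), pvSkipWord]
    simp [find_position_word_left_py_loop]
  | succ k ih =>
    have e1 : ((k + 1 : Nat) : Int) = (k : Int) + 1 := by push_cast; ring
    rw [e1, PySem.List.pyRange_neg_one_cons (by omega), pvSkipWord]
    by_cases hsp : PySem.Chars.isspace (cs[k]?.getD ' ') = true
    · simp [find_position_word_left_py_loop, hsp]
    · simp [find_position_word_left_py_loop, hsp, ih]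

-- A's loop with firstSpace = true and the flag still false is the two phases in sequence
theorem pv_loop_space (cs : List Char) (n : Nat) :
    find_position_word_left_py_loop cs true (PySem.List.pyRange (n : Int) 0 (-1)) false
      = pvSkipWord cs (pvSkipSpaces cs (n : Int)) := by
  induction n with
  | zero =>
    rw [PySem.List.pyRange_neg_one_eq_nil (by omega), pvSkipSpaces, pvSkipWord]
    simp [find_position_word_left_py_loop]
  | succ k ih =>
    have e1 : ((k + 1 : Nat) : Int) = (k : Int) + 1 := by push_cast; ring
    rw [e1, PySem.List.pyRange_neg_one_cons (by omega), pvSkipSpaces]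
    by_cases hsp : PySem.Chars.isspace (cs[k]?.getD ' ') = true
    · simp [find_position_word_left_py_loop, hsp, ih]
    · have hstep : pvSkipWord cs ((k : Int) + 1) = pvSkipWord cs (k : Int) := by
        rw [pvSkipWord]
        simp [hsp]
      simp [find_position_word_left_py_loop, hsp, pv_loop_word, hstep]

-- the word-skipping phase computes one past the last whitespace in the length-n prefix
theorem pv_skipWord_eq_lastFold (cs : List Char) (n : Nat) (hn : n ≤ cs.length) :
    pvSkipWord cs (n : Int) = pvLastFold (cs.take n) + 1 := by
  induction n with
  | zero =>
    rw [pvSkipWord]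
    simp [pvLastFold, PySem.List.enumerate_nil]
  | succ k ih =>
    have hk : k < cs.length := by omega
    have htake : cs.take (k + 1) = cs.take k ++ [cs[k]] := by
      rw [List.take_add_one]; simp [List.getElem?_eq_getElem hk]
    have e1 : ((k + 1 : Nat) : Int) - 1 = ((k : Nat) : Int) := by push_cast; ring
    have hget : PySem.List.pyGetD cs (((k + 1 : Nat) : Int) - 1) ' ' = cs[k] := by
      rw [e1, PySem.List.pyGetD_eq_getElem cs ' ' (by omega) (by exact_mod_cast hk)]
      simp
    have hlen : ((cs.take k).length : Int) = (k : Int) := by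
      simp [List.length_take, Nat.min_eq_left (le_of_lt hk)]
    rw [pvSkipWord, htake, pvLastFold_concat]
    by_cases hsp : PySem.Chars.isspace cs[k] = true
    · rw [dif_neg (by rw [hget]; simp [hsp])]
      rw [hsp]
      simp only [if_true]
      omega
    · rw [dif_pos ⟨by exact_mod_cast Nat.succ_pos k, by rw [hget]; simp [hsp]⟩]
      rw [e1, ih (by omega)]
      simp [hsp]

-- the space-skipping phase computes exactly the rstripped prefix
theorem pv_skipSpaces_eq_rstrip (cs : List Char) (n : Nat) (hn : n ≤ cs.length) :
    ∃ m : Nat, m ≤ n ∧ pvSkipSpaces cs (n : Int) = (m : Int) ∧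
      PySem.Chars.rstrip (cs.take n) = cs.take m := by
  induction n with
  | zero =>
    refine ⟨0, le_refl _, ?_, ?_⟩
    · rw [pvSkipSpaces]; simp
    · simp [PySem.Chars.rstrip]
  | succ k ih =>
    have hk : k < cs.length := by omega
    have htake : cs.take (k + 1) = cs.take k ++ [cs[k]] := by
      rw [List.take_add_one]; simp [List.getElem?_eq_getElem hk]
    have e1 : ((k + 1 : Nat) : Int) - 1 = ((k : Nat) : Int) := by push_cast; ring
    have hget : PySem.List.pyGetD cs (((k + 1 : Nat) : Int) - 1) ' ' = cs[k] := by
      rw [e1, PySem.List.pyGetD_eq_getElem cs ' ' (by omega) (by exact_mod_cast hk)]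
      simp
    by_cases hsp : PySem.Chars.isspace cs[k] = true
    · obtain ⟨m, hm, hval, hr⟩ := ih (by omega)
      refine ⟨m, by omega, ?_, ?_⟩
      · rw [pvSkipSpaces, dif_pos ⟨by exact_mod_cast Nat.succ_pos k, by rw [hget]; exact hsp⟩, e1]
        exact hval
      · rw [htake, pv_rstrip_concat, if_pos hsp, hr]
    · refine ⟨k + 1, le_refl _, ?_, ?_⟩
      · rw [pvSkipSpaces, dif_neg (by rw [hget]; simp [hsp])]
      · rw [htake, pv_rstrip_concat, if_neg (by simp [hsp])]

-- ===== VERDICT (by name: the statement is the Claim_ definition above) =====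
theorem find_position_word_left_py_spec : Claim_equal_find_position_word_left_py := by
  intro text ci _hDom hPre
  unfold Spec_find_position_word_left_py
  obtain ⟨h1, h2⟩ := hPre
  unfold find_position_word_left_py find_position_word_left_py_alt
  by_cases hp : ci - 1 ≤ 0
  · -- loop range is empty on A's side; B takes its early-return branch
    rw [PySem.List.pyRange_neg_one_eq_nil (by omega)]
    cases PySem.List.pyGet? text.toList (ci - 1) <;>
      simp [find_position_word_left_py_loop, hp]
  · have hpos : 0 < ci - 1 := by omega
    have hsome : PySem.List.pyGet? text.toList (ci - 1)
        = some (text.toList[(ci - 1).toNat]) :=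
      PySem.List.pyGet?_eq_some_getElem text.toList (by omega) h2
    rw [hsome]
    have hn : ci - 1 = (((ci - 1).toNat : Nat) : Int) := by omega
    have hslice : PySem.List.slice text.toList none (some (ci - 1))
        = text.toList.take (ci - 1).toNat := PySem.List.slice_to _ (by omega)
    have hle : (ci - 1).toNat ≤ text.toList.length := by omega
    by_cases hsp : PySem.Chars.isspace (text.toList[(ci - 1).toNat]) = true
    · simp only [hsp, if_pos, Bool.not_true, if_neg hp, hslice]
      rw [hn, pv_loop_space]
      simp only [Int.toNat_natCast]
      obtain ⟨m, hm, hval, hr⟩ := pv_skipSpaces_eq_rstrip text.toList (ci - 1).toNat hle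
      rw [hval, hr, pv_skipWord_eq_lastFold text.toList m (le_trans hm hle)]
      rfl
    · simp only [hsp, Bool.not_false, if_neg hp, hslice]
      rw [hn]
      simp only [Int.toNat_natCast]
      rw [pv_loop_word, pv_skipWord_eq_lastFold text.toList (ci - 1).toNat hle]
      rfl
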